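-- pv_equiv track=rewrite | github.com/tkfka1/CodingTest | 프로그래머스/unrated/181887. 홀수 vs 짝수/홀수 vs 짝수.py | solution
-- ===== SOURCE A (Python) =====
-- def solution(num_list):
--
--     sum_odd = 0
--     sum_even = 0
--
--     for i in range(len(num_list)):
--         if i % 2 == 1:
--             sum_odd += num_list[i]
--         else:
--             sum_even += num_list[i]
--
--
--     return max(sum_odd,sum_even)
-- ===== SOURCE B (Python) =====
-- def solution(num_list):
--     total = sum(num_list)
--     alt = 0
--     sign = 1
--     for x in num_list:
--         alt += sign * x
--         sign = -sign
--     # alt = sum_even - sum_odd, total = sum_even + sum_odd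
--     return max((total - alt) // 2, (total + alt) // 2)
-- ===== Notes on version B (the rewrite author's own statement) =====
-- stated objective: alternative
-- what changed: Instead of splitting elements by index parity, B computes the total sum and the alternating sum (+,-,+,...) and recovers sum_even=(total+alt)//2 and sum_odd=(total-alt)//2 by the half-sum/half-difference identity.
import Mathlib
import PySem

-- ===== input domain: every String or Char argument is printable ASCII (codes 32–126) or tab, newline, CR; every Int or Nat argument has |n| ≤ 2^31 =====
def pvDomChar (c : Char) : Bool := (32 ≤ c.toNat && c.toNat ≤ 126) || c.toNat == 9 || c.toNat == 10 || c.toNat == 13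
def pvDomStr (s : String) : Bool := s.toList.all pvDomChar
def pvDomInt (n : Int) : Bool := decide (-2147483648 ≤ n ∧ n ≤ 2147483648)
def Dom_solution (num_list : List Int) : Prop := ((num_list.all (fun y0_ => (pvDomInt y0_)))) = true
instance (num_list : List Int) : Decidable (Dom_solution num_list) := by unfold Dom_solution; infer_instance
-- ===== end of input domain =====

-- B avoids the index-parity split entirely: it computes the total sum and the
-- alternating sum and recovers the two parity sums by the half-sum/half-difference
-- identity (objective: alternative algorithm; same cost).

-- ===== PORT A =====
def solution (num_list : List Int) : Int :=
  let s := (PySem.List.pyRange 0 (PySem.List.len num_list) 1).foldl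
    (fun (p : Int × Int) i =>
      if PySem.Int.mod i 2 = 1 then (p.1 + PySem.List.pyGetD num_list i 0, p.2)
      else (p.1, p.2 + PySem.List.pyGetD num_list i 0)) (0, 0)
  max s.1 s.2

-- ===== PORT B =====
def solution_alt (num_list : List Int) : Int :=
  let total := num_list.foldl (· + ·) 0                     -- sum(num_list)
  let p := num_list.foldl                                    -- alt/sign loop
    (fun (q : Int × Int) x => (q.1 + q.2 * x, -q.2)) (0, 1)
  max (PySem.Int.floordiv (total - p.1) 2) (PySem.Int.floordiv (total + p.1) 2)

-- ===== PRECONDITION & SPEC =====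
def Spec_solution (num_list : List Int) (out : Int) : Prop := out = solution_alt num_list
instance (num_list : List Int) (out : Int) : Decidable (Spec_solution num_list out) := by unfold Spec_solution; infer_instance

-- ===== CLAIM (what is proved, stated in full; the proofs are below) =====
def Claim_equal_solution : Prop := ∀ (num_list : List Int), Dom_solution num_list → Spec_solution num_list (solution num_list)

-- ===== LEMMAS AND PROOFS =====

-- (even-offset sum, odd-offset sum) of a list
def pvT : List Int → Int × Int
  | [] => (0, 0)
  | x :: xs => (x + (pvT xs).2, (pvT xs).1)

-- alternating sum x0 - x1 + x2 - ...
def pvAlt : List Int → Int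
  | [] => 0
  | x :: xs => x - pvAlt xs

theorem pvAlt_eq (l : List Int) : pvAlt l = (pvT l).1 - (pvT l).2 := by
  induction l with
  | nil => simp [pvAlt, pvT]
  | cons x xs ih => simp [pvAlt, pvT, ih]; ring

theorem pvSum_fold (l : List Int) : ∀ a : Int,
    l.foldl (· + ·) a = a + (pvT l).1 + (pvT l).2 := by
  induction l with
  | nil => intro a; simp [pvT]
  | cons x xs ih => intro a; simp only [List.foldl_cons, ih, pvT]; ring

theorem pvAlt_fold (l : List Int) : ∀ a s : Int,
    (l.foldl (fun (q : Int × Int) x => (q.1 + q.2 * x, -q.2)) (a, s)).1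
      = a + s * pvAlt l := by
  induction l with
  | nil => intro a s; simp [pvAlt]
  | cons x xs ih => intro a s; simp only [List.foldl_cons, ih, pvAlt]; ring

theorem pvA_fold (full : List Int) (l : List Int) : ∀ (j : Int) (p : Int × Int),
    0 ≤ j → full.drop j.toNat = l → j + l.length = full.length →
    (PySem.List.pyRange j (PySem.List.len full) 1).foldl
      (fun (p : Int × Int) i =>
        if PySem.Int.mod i 2 = 1 then (p.1 + PySem.List.pyGetD full i 0, p.2)
        else (p.1, p.2 + PySem.List.pyGetD full i 0)) p =
    if PySem.Int.mod j 2 = 1 then (p.1 + (pvT l).1, p.2 + (pvT l).2)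
    else (p.1 + (pvT l).2, p.2 + (pvT l).1) := by
  induction l with
  | nil =>
      intro j p hj hdrop hlen
      have hje : j = (full.length : Int) := by simpa using hlen
      rw [PySem.List.len_eq, PySem.List.pyRange_one_eq_nil (by omega)]
      simp [pvT]
  | cons x xs ih =>
      intro j p hj hdrop hlen
      have hjlt : j < (full.length : Int) := by simp at hlen; omega
      rw [PySem.List.len_eq, PySem.List.pyRange_one_cons (by omega)]
      have hget : PySem.List.pyGetD full j 0 = x := by
        rw [PySem.List.pyGetD_eq_getElem full 0 hj (by simpa using hjlt)]
        have h2 : full[j.toNat]? = some x := by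
          rw [← List.head?_drop, hdrop]; rfl
        obtain ⟨hlt, hx⟩ := List.getElem?_eq_some_iff.mp h2
        exact hx
      have hdrop' : full.drop (j+1).toNat = xs := by
        have ht : (j+1).toNat = j.toNat + 1 := by omega
        rw [ht, ← List.drop_drop, hdrop]
        simp
      have hlen' : (j+1) + (xs.length : Int) = full.length := by
        simp at hlen ⊢; omega
      have ihx := ih (j+1) (if PySem.Int.mod j 2 = 1
          then (p.1 + x, p.2) else (p.1, p.2 + x)) (by omega) hdrop' hlen'
      rw [List.foldl_cons, hget]
      rw [PySem.List.len_eq] at ihx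
      rw [ihx]
      have hm : PySem.Int.mod j 2 = j % 2 := PySem.Int.mod_eq_emod_of_pos (by norm_num)
      have hm1 : PySem.Int.mod (j+1) 2 = (j+1) % 2 := PySem.Int.mod_eq_emod_of_pos (by norm_num)
      rw [hm, hm1]
      simp only [pvT]
      rcases Int.emod_two_eq_zero_or_one j with h0 | h1
      · have h1' : (j+1) % 2 = 1 := by omega
        rw [h0, h1']
        simp only [reduceIte]
        rw [Prod.ext_iff]
        constructor <;> simp <;> ring
      · have h0' : (j+1) % 2 = 0 := by omega
        rw [h1, h0']
        simp only [reduceIte]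
        rw [Prod.ext_iff]
        constructor <;> simp <;> ring

-- ===== VERDICT (by name: the statement is the Claim_ definition above) =====
theorem solution_spec : Claim_equal_solution := by
  intro num_list _
  unfold Spec_solution solution solution_alt
  have h := pvA_fold num_list num_list 0 (0, 0) le_rfl (by simp) (by simp)
  simp only [h]
  rw [if_neg (by rw [PySem.Int.mod_eq_emod_of_pos (by norm_num)]; norm_num)]
  rw [pvSum_fold, pvAlt_fold, pvAlt_eq]
  have e1 : (0 : Int) + (pvT num_list).1 + (pvT num_list).2
      - (0 + 1 * ((pvT num_list).1 - (pvT num_list).2)) = 2 * (pvT num_list).2 := by ring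
  have e2 : (0 : Int) + (pvT num_list).1 + (pvT num_list).2
      + (0 + 1 * ((pvT num_list).1 - (pvT num_list).2)) = 2 * (pvT num_list).1 := by ring
  rw [e1, e2, PySem.Int.floordiv_eq_ediv_of_pos (by norm_num),
     PySem.Int.floordiv_eq_ediv_of_pos (by norm_num),
     Int.mul_ediv_cancel_left _ (by norm_num), Int.mul_ediv_cancel_left _ (by norm_num)]
  simp
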